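-- pv_equiv track=rewrite | github.com/Seeeecret/myaqua_vae | util/compareSafetensorsPlus.py | categorize_key
-- ===== SOURCE A (Python) =====
-- def categorize_key(key):
--     categories = {
--         1: ("ff", "down.weight"),
--         2: ("ff", "up.weight"),
--         3: ("attn", "down.weight"),
--         4: ("attn", "up.weight"),
--         5: ("proj_in", "down.weight"),
--         6: ("proj_in", "up.weight"),
--         7: ("proj_out", "down.weight"),
--         8: ("proj_out", "up.weight")
--     }
--     for category, (substr1, substr2) in categories.items():
--         if substr1 in key and substr2 in key:
--             return category
--     return None  # 如果不符合任何类别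
-- ===== SOURCE B (Python) =====
-- GROUPS = ["ff", "attn", "proj_in", "proj_out"]
--
-- def categorize_key(key):
--     for i, g in enumerate(GROUPS):
--         if g in key:
--             if "down.weight" in key:
--                 return 2 * i + 1
--             if "up.weight" in key:
--                 return 2 * i + 2
--             return None
--     return None
-- ===== Notes on version B (the rewrite author's own statement) =====
-- stated objective: simpler
-- what changed: Replaced the flat scan over 8 (group, direction) pairs by a two-axis decomposition: find the first matching group among ['ff','attn','proj_in','proj_out'], then one check per direction yields 2*i+1 / 2*i+2, exploiting that both direction substrings are shared by all groups.
import Mathlib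
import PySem

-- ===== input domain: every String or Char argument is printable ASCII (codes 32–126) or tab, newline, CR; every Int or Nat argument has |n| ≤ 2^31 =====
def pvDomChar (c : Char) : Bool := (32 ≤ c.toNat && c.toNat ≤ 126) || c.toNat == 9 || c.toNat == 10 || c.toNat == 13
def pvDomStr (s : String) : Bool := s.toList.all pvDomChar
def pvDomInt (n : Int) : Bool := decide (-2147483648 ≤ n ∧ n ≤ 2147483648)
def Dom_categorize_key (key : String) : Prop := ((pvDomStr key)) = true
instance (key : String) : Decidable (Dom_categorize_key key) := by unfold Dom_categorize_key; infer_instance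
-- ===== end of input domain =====

-- B factors A's flat 8-pair scan into a group search plus a direction check (simpler decomposition, same results).

-- ===== PORT A =====
-- the dict literal of A, as an insertion-ordered PySem.Dict
def pvCategories : PySem.Dict Int (String × String) :=
  PySem.Dict.ofList
    [(1, ("ff", "down.weight")), (2, ("ff", "up.weight")),
     (3, ("attn", "down.weight")), (4, ("attn", "up.weight")),
     (5, ("proj_in", "down.weight")), (6, ("proj_in", "up.weight")),
     (7, ("proj_out", "down.weight")), (8, ("proj_out", "up.weight"))]

-- the 'for category, (substr1, substr2) in categories.items():' loop with its early return
def pvLoopA (key : String) : List (Int × String × String) → Option Int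
  | [] => none
  | (category, substr1, substr2) :: rest =>
      if PySem.Str.isIn substr1 key && PySem.Str.isIn substr2 key then some category
      else pvLoopA key rest

def categorize_key (key : String) : Option Int :=
  pvLoopA key pvCategories.items

-- ===== PORT B =====
def pvGroups : List String := ["ff", "attn", "proj_in", "proj_out"]

def categorize_key_alt (key : String) : Option Int :=
  match (PySem.List.enumerate pvGroups).find? (fun p => PySem.Str.isIn p.2 key) with
  | none => none
  | some (i, _) =>
      if PySem.Str.isIn "down.weight" key then some (2 * i + 1)
      else if PySem.Str.isIn "up.weight" key then some (2 * i + 2)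
      else none

-- ===== PRECONDITION & SPEC =====
def Spec_categorize_key (key : String) (out : Option Int) : Prop := out = categorize_key_alt key
instance (key : String) (out : Option Int) : Decidable (Spec_categorize_key key out) := by unfold Spec_categorize_key; infer_instance

-- ===== CLAIM (what is proved, stated in full; the proofs are below) =====
def Claim_equal_categorize_key : Prop := ∀ (key : String), Dom_categorize_key key → Spec_categorize_key key (categorize_key key)

-- ===== LEMMAS AND PROOFS =====
theorem pvCategories_items :
    pvCategories.items =
      [(1, ("ff", "down.weight")), (2, ("ff", "up.weight")),
       (3, ("attn", "down.weight")), (4, ("attn", "up.weight")),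
       (5, ("proj_in", "down.weight")), (6, ("proj_in", "up.weight")),
       (7, ("proj_out", "down.weight")), (8, ("proj_out", "up.weight"))] := by
  decide

-- ===== VERDICT (by name: the statement is the Claim_ definition above) =====
theorem categorize_key_spec : Claim_equal_categorize_key := by
  intro key _
  unfold Spec_categorize_key categorize_key categorize_key_alt
  rw [pvCategories_items]
  cases hf : PySem.Str.isIn "ff" key <;>
  cases ha : PySem.Str.isIn "attn" key <;>
  cases hpi : PySem.Str.isIn "proj_in" key <;>
  cases hpo : PySem.Str.isIn "proj_out" key <;>
  cases hd : PySem.Str.isIn "down.weight" key <;>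
  cases hu : PySem.Str.isIn "up.weight" key <;>
  simp [pvLoopA, pvGroups, PySem.List.enumerate, PySem.Str.isIn] at * <;> simp_all
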